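-- pv_equiv track=rewrite | github.com/krnets/codewars-practice | 7kyu/Simple Fun 129 - Repeat Sequence Length/kata.py | repeat_sequence_len
-- ===== SOURCE A (Python) =====
-- def repeat_sequence_len(n):
--     tortoise = n
--     f = lambda m: sum(int(c) ** 2 for c in str(m))
--     hare = f(n)
--     ans = 1
--
--     while tortoise != hare:
--         tortoise = f(tortoise)
--         hare = f(f(hare))
--
--     hare = f(hare)
--
--     while tortoise != hare:
--         hare = f(hare)
--         ans += 1
--
--     return ans
-- ===== SOURCE B (Python) =====
-- def repeat_sequence_len(n):
--     def f(m):
--         s = 0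
--         while m > 0:
--             m, d = divmod(m, 10)
--             s += d * d
--         return s
--     seen = {}
--     x, i = n, 0
--     while x not in seen:
--         seen[x] = i
--         x = f(x)
--         i += 1
--     return i - seen[x]
-- ===== Notes on version B (the rewrite author's own statement) =====
-- stated objective: faster
-- what changed: Replaces Floyd's tortoise-and-hare cycle detection (three string-based digit-square-sum calls per step plus a second counting loop) with a single pass that memoizes each value's first-seen index in a dict and computes the digit square sum arithmetically with divmod, returning current index minus first-seen index.
import Mathlib
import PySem

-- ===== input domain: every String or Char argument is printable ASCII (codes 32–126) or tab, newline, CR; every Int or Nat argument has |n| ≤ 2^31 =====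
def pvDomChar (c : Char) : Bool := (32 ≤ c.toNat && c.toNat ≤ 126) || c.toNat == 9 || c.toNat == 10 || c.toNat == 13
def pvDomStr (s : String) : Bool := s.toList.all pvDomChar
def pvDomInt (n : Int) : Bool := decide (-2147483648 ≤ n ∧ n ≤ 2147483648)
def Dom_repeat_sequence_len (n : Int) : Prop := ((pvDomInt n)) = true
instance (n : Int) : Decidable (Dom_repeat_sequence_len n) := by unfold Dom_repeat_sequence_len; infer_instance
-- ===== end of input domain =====

-- B replaces Floyd's two-pointer cycle detection (three string-based digit-square-sum calls per
-- step, plus a second counting loop) by one pass that memoizes each value's first-seen index in a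
-- dict and computes digit square sums arithmetically with divmod: fewer and cheaper f-evaluations
-- per step (a constant-factor mechanism; per-call times are too small for a timing run to verify).

-- ===== PORT A =====
-- fuel bound for the while-loops (a totalizing guard only; the proofs show the loops exit
-- strictly before the fuel runs out on every input admitted by Pre_).
def pvFuel : Nat := 5000

-- f = lambda m: sum(int(c) ** 2 for c in str(m)); int(c) on a non-digit char ('-') raises in
-- Python: ofChars? is none there, totalized with getD 0 (such m only arise for n < 0, outside Pre_).
def pvF (m : Int) : Int :=
  ((PySem.Int.toChars m).map (fun c => ((PySem.Int.ofChars? [c]).getD 0) ^ 2)).sum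

-- while tortoise != hare: tortoise = f(tortoise); hare = f(f(hare))
def pvALoop1 : Nat → Int → Int → Int × Int
  | 0, t, h => (t, h)
  | fuel+1, t, h => if t = h then (t, h) else pvALoop1 fuel (pvF t) (pvF (pvF h))

-- while tortoise != hare: hare = f(hare); ans += 1
def pvALoop2 : Nat → Int → Int → Int → Int
  | 0, _, _, ans => ans
  | fuel+1, t, h, ans => if t = h then ans else pvALoop2 fuel t (pvF h) (ans + 1)

def repeat_sequence_len (n : Int) : Int :=
  let p := pvALoop1 pvFuel n (pvF n)
  pvALoop2 pvFuel p.1 (pvF p.2) 1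

-- ===== PORT B =====
-- def f(m): s = 0; while m > 0: m, d = divmod(m, 10); s += d*d; return s
-- (fuel is a totalizing guard; a nonnegative m has far fewer than pvFuel digits)
def pvBDss : Nat → Int → Int → Int
  | 0, _, s => s
  | fuel+1, m, s =>
    if 0 < m then pvBDss fuel (PySem.Int.floordiv m 10) (s + PySem.Int.mod m 10 * PySem.Int.mod m 10)
    else s

def pvFb (m : Int) : Int := pvBDss pvFuel m 0

-- while x not in seen: seen[x] = i; x = f(x); i += 1
-- return i - seen[x]
def pvBLoop : Nat → PySem.Dict Int Int → Int → Int → Int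
  | 0, _, _, _ => 0
  | fuel+1, seen, x, i =>
    match PySem.Dict.get? seen x with
    | some j => i - j
    | none => pvBLoop fuel (PySem.Dict.insert seen x i) (pvFb x) (i + 1)

def repeat_sequence_len_alt (n : Int) : Int :=
  pvBLoop pvFuel PySem.Dict.empty n 0

-- ===== PRECONDITION & SPEC =====
-- Python A raises ValueError on negative n (int('-') on the sign character): excluded.
def Pre_repeat_sequence_len (n : Int) : Prop := 0 ≤ n
instance (n : Int) : Decidable (Pre_repeat_sequence_len n) := by unfold Pre_repeat_sequence_len; infer_instance

def pvWitness_repeat_sequence_len : Int := (7)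

def Spec_repeat_sequence_len (n : Int) (out : Int) : Prop := out = repeat_sequence_len_alt n
instance (n : Int) (out : Int) : Decidable (Spec_repeat_sequence_len n out) := by unfold Spec_repeat_sequence_len; infer_instance

-- ===== CLAIM (what is proved, stated in full; the proofs are below) =====
def Claim_equal_repeat_sequence_len : Prop := ∀ (n : Int), Dom_repeat_sequence_len n → Pre_repeat_sequence_len n → Spec_repeat_sequence_len n (repeat_sequence_len n)

-- ===== LEMMAS AND PROOFS =====

def pvDssN (n : Nat) : Nat :=
  if h : n = 0 then 0 else pvDssN (n / 10) + (n % 10) * (n % 10)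
decreasing_by exact Nat.div_lt_self (Nat.pos_of_ne_zero h) (by norm_num)

def pvDss (m : Int) : Int := (pvDssN m.toNat : Int)
def pvSeq (n : Int) (t : Nat) : Int := pvDss^[t] n

theorem pvDssN_zero : pvDssN 0 = 0 := by unfold pvDssN; simp
theorem pvDssN_step (n : Nat) : pvDssN n = pvDssN (n / 10) + (n % 10) * (n % 10) := by
  rcases eq_or_ne n 0 with rfl | h
  · simp [pvDssN]
  · rw [pvDssN]; simp [h]

theorem pvSeq_succ (n : Int) (t : Nat) : pvSeq n (t+1) = pvDss (pvSeq n t) := by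
  simp [pvSeq, Function.iterate_succ_apply']

theorem pvDss_nonneg (m : Int) : 0 ≤ pvDss m := by
  simp [pvDss]

theorem pvSeq_nonneg (n : Int) (hn : 0 ≤ n) (t : Nat) : 0 ≤ pvSeq n t := by
  cases t with
  | zero => exact hn
  | succ t => rw [pvSeq_succ]; exact pvDss_nonneg _

theorem pvDssN_le (k : Nat) : ∀ n : Nat, n < 10 ^ k → pvDssN n ≤ 81 * k := by
  induction k with
  | zero => intro n hn; interval_cases n; simp [pvDssN_zero]
  | succ k ih =>
    intro n hn
    rw [pvDssN_step]
    have h1 : n / 10 < 10 ^ k := by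
      rw [Nat.div_lt_iff_lt_mul (by norm_num)]
      calc n < 10 ^ (k+1) := hn
        _ = 10 ^ k * 10 := by ring
    have h2 : n % 10 < 10 := Nat.mod_lt _ (by norm_num)
    have := ih (n / 10) h1
    have h3 : n % 10 ≤ 9 := by omega
    have h4 : n % 10 * (n % 10) ≤ 81 := le_trans (Nat.mul_le_mul h3 h3) (by norm_num)
    omega

theorem pvDigitVal : ∀ d : Nat, d < 10 → ((PySem.Int.ofChars? [Nat.digitChar d]).getD 0) = (d : Int) := by decide

theorem pvToDigitsCore_sum (fuel : Nat) : ∀ (n : Nat) (acc : List Char), n < fuel →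
    ((Nat.toDigitsCore 10 fuel n acc).map (fun c => ((PySem.Int.ofChars? [c]).getD 0) ^ 2)).sum
      = (pvDssN n : Int) + (acc.map (fun c => ((PySem.Int.ofChars? [c]).getD 0) ^ 2)).sum := by
  induction fuel with
  | zero => intro n acc h; omega
  | succ fuel ih =>
    intro n acc h
    rw [show Nat.toDigitsCore 10 (fuel+1) n acc = (if n / 10 = 0 then (n % 10).digitChar :: acc else Nat.toDigitsCore 10 fuel (n / 10) ((n % 10).digitChar :: acc)) from rfl]
    by_cases h0 : n / 10 = 0
    · have h10 : n < 10 := by omega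
      simp only [h0, if_true, List.map_cons, List.sum_cons]
      rw [pvDigitVal _ (Nat.mod_lt _ (by norm_num))]
      rw [pvDssN_step n, h0]
      have : pvDssN 0 = 0 := by simp [pvDssN]
      rw [this]
      push_cast
      ring
    · rw [if_neg h0]
      rw [ih (n / 10) _ (by omega)]
      simp only [List.map_cons, List.sum_cons]
      rw [pvDigitVal _ (Nat.mod_lt _ (by norm_num))]
      rw [pvDssN_step n]
      push_cast
      ring

theorem pvF_eq (m : Int) (hm : 0 ≤ m) : pvF m = pvDss m := by
  unfold pvF pvDss PySem.Int.toChars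
  rw [if_neg (by omega)]
  unfold Nat.toDigits
  rw [pvToDigitsCore_sum _ _ _ (Nat.lt_succ_self _)]
  simp

theorem pvF_seq (n : Int) (hn : 0 ≤ n) (t : Nat) : pvF (pvSeq n t) = pvSeq n (t+1) := by
  rw [pvF_eq _ (pvSeq_nonneg n hn t), pvSeq_succ]

theorem pvBDss_eq (fuel : Nat) : ∀ (m s : Int), 0 ≤ m → m.toNat < 10 ^ fuel →
    pvBDss fuel m s = s + pvDss m := by
  induction fuel with
  | zero =>
    intro m s hm hf
    have : m = 0 := by omega
    subst this
    show s = s + pvDss 0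
    simp [pvDss, pvDssN]
  | succ fuel ih =>
    intro m s hm hf
    show (if 0 < m then pvBDss fuel (PySem.Int.floordiv m 10) (s + PySem.Int.mod m 10 * PySem.Int.mod m 10) else s) = s + pvDss m
    by_cases h0 : 0 < m
    · rw [if_pos h0]
      have hm10 : PySem.Int.floordiv m 10 = ((m.toNat / 10 : Nat) : Int) := by
        conv_lhs => rw [show m = ((m.toNat : Nat) : Int) by omega]
        exact_mod_cast PySem.Int.floordiv_natCast m.toNat 10
      have hmod : PySem.Int.mod m 10 = ((m.toNat % 10 : Nat) : Int) := by
        conv_lhs => rw [show m = ((m.toNat : Nat) : Int) by omega]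
        exact_mod_cast PySem.Int.mod_natCast m.toNat 10
      rw [hm10, hmod, ih _ _ (by positivity) (by
        have : m.toNat / 10 < 10 ^ fuel := by
          rw [Nat.div_lt_iff_lt_mul (by norm_num)]
          calc m.toNat < 10 ^ (fuel+1) := hf
            _ ≤ 10 ^ fuel * 10 := by ring_nf; omega
        simpa only [Int.toNat_natCast] using this)]
      unfold pvDss
      simp only [Int.toNat_natCast]
      rw [pvDssN_step m.toNat]
      push_cast
      ring
    · rw [if_neg h0]
      have : m = 0 := by omega
      subst this
      simp [pvDss, pvDssN]

theorem pvFb_eq (m : Int) (hm : 0 ≤ m) (hb : m.toNat ≤ 2 ^ 31) : pvFb m = pvDss m := by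
  unfold pvFb
  rw [pvBDss_eq pvFuel m 0 hm (by
    calc m.toNat ≤ 2 ^ 31 := hb
      _ < 10 ^ 10 := by norm_num
      _ ≤ 10 ^ pvFuel := Nat.pow_le_pow_right (by norm_num) (by norm_num [pvFuel]))]
  simp

theorem pvSeq_le810 (n : Int) (hn : 0 ≤ n) (hb : n ≤ 2 ^ 31) (t : Nat) (ht : 1 ≤ t) :
    pvSeq n t ≤ 810 := by
  induction t with
  | zero => omega
  | succ t ih =>
    rw [pvSeq_succ]
    rcases Nat.eq_or_lt_of_le ht with h1 | h1
    · -- t = 0 : pvDss n with n ≤ 2^31 < 10^10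
      have h0 : t = 0 := by omega
      subst h0
      unfold pvDss pvSeq
      have : pvDssN n.toNat ≤ 81 * 10 := pvDssN_le 10 n.toNat (by omega)
      simp only [Function.iterate_zero, id]
      omega
    · have hts : 1 ≤ t := by omega
      have hv := ih hts
      have hnn := pvSeq_nonneg n hn t
      unfold pvDss
      have : pvDssN (pvSeq n t).toNat ≤ 81 * 3 := pvDssN_le 3 _ (by omega)
      omega

theorem pvSeq_le (n : Int) (hn : 0 ≤ n) (hb : n ≤ 2 ^ 31) (t : Nat) : pvSeq n t ≤ 2 ^ 31 := by
  cases t with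
  | zero => exact hb
  | succ t => have := pvSeq_le810 n hn hb (t+1) (by omega); omega

theorem pvFb_seq (n : Int) (hn : 0 ≤ n) (hb : n ≤ 2 ^ 31) (t : Nat) :
    pvFb (pvSeq n t) = pvSeq n (t+1) := by
  rw [pvFb_eq _ (pvSeq_nonneg n hn t) (by have := pvSeq_le n hn hb t; have := pvSeq_nonneg n hn t; omega), pvSeq_succ]

theorem pvExists_repeat (n : Int) (hn : 0 ≤ n) (hb : n ≤ 2 ^ 31) :
    ∃ a b : Nat, a < b ∧ b ≤ 812 ∧ pvSeq n a = pvSeq n b := by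
  have hmaps : ∀ i ∈ Finset.range 812, pvSeq n (i+1) ∈ Finset.Icc (0:Int) 810 := by
    intro i _
    exact Finset.mem_Icc.mpr ⟨pvSeq_nonneg n hn _, pvSeq_le810 n hn hb _ (by omega)⟩
  have hcard : (Finset.Icc (0:Int) 810).card < (Finset.range 812).card := by
    simp [Int.card_Icc]
  obtain ⟨a, ha, b, hbm, hne, heq⟩ :=
    Finset.exists_ne_map_eq_of_card_lt_of_maps_to hcard hmaps
  rcases Nat.lt_or_ge a b with h | h
  · exact ⟨a+1, b+1, by omega, by simp at hbm; omega, heq⟩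
  · have : b < a := by omega
    exact ⟨b+1, a+1, by omega, by simp at ha; omega, heq.symm⟩

theorem pvSeq_add (n : Int) (s t : Nat) : pvSeq n (s + t) = pvDss^[s] (pvSeq n t) :=
  Function.iterate_add_apply pvDss s t n

theorem pvPer (n : Int) (i0 j0 : Nat) (hij : i0 < j0) (heq : pvSeq n i0 = pvSeq n j0)
    (t : Nat) (ht : i0 ≤ t) : pvSeq n (t + (j0 - i0)) = pvSeq n t := by
  have h1 : t + (j0 - i0) = (t - i0) + j0 := by omega
  have h2 : t = (t - i0) + i0 := by omega
  rw [h1, pvSeq_add, ← heq, ← pvSeq_add, ← h2]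

theorem pvPer_mul (n : Int) (i0 j0 : Nat) (hij : i0 < j0) (heq : pvSeq n i0 = pvSeq n j0)
    (t q : Nat) (ht : i0 ≤ t) : pvSeq n (t + q * (j0 - i0)) = pvSeq n t := by
  induction q with
  | zero => simp
  | succ q ih =>
    have h1 : t + (q+1) * (j0 - i0) = (t + q * (j0 - i0)) + (j0 - i0) := by ring
    rw [h1, pvPer n i0 j0 hij heq _ (by omega), ih]

theorem pvCanon (n : Int) (i0 j0 : Nat) (hij : i0 < j0) (heq : pvSeq n i0 = pvSeq n j0)
    (a : Nat) (ha : i0 ≤ a) : pvSeq n a = pvSeq n (i0 + (a - i0) % (j0 - i0)) := by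
  have hl : 0 < j0 - i0 := by omega
  have h1 : a = (i0 + (a - i0) % (j0 - i0)) + ((a - i0) / (j0 - i0)) * (j0 - i0) := by
    have h0 := Nat.mod_add_div (a - i0) (j0 - i0)
    have hc : ((a - i0) / (j0 - i0)) * (j0 - i0) = (j0 - i0) * ((a - i0) / (j0 - i0)) := Nat.mul_comm _ _
    omega
  calc pvSeq n a = pvSeq n ((i0 + (a - i0) % (j0 - i0)) + ((a - i0) / (j0 - i0)) * (j0 - i0)) := by rw [← h1]
    _ = pvSeq n (i0 + (a - i0) % (j0 - i0)) := pvPer_mul n i0 j0 hij heq _ _ (by omega)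

theorem pvEq_iff_dvd (n : Int) (i0 j0 : Nat) (hij : i0 < j0) (heq : pvSeq n i0 = pvSeq n j0)
    (hdist : ∀ a b : Nat, a < b → b < j0 → pvSeq n a ≠ pvSeq n b)
    (a b : Nat) (ha : i0 ≤ a) (hab : a ≤ b) :
    pvSeq n a = pvSeq n b ↔ (j0 - i0) ∣ (b - a) := by
  have hl : 0 < j0 - i0 := by omega
  constructor
  · intro h
    have hb : i0 ≤ b := le_trans ha hab
    have hca := pvCanon n i0 j0 hij heq a ha
    have hcb := pvCanon n i0 j0 hij heq b hb
    have hma : (a - i0) % (j0 - i0) < j0 - i0 := Nat.mod_lt _ hl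
    have hmb : (b - i0) % (j0 - i0) < j0 - i0 := Nat.mod_lt _ hl
    have hwin : (a - i0) % (j0 - i0) = (b - i0) % (j0 - i0) := by
      by_contra hne
      rcases Nat.lt_or_ge ((a - i0) % (j0 - i0)) ((b - i0) % (j0 - i0)) with hlt | hge
      · exact hdist (i0 + (a - i0) % (j0 - i0)) (i0 + (b - i0) % (j0 - i0)) (by omega) (by omega) (by rw [← hca, ← hcb]; exact h)
      · have hlt : (b - i0) % (j0 - i0) < (a - i0) % (j0 - i0) := by omega
        exact hdist (i0 + (b - i0) % (j0 - i0)) (i0 + (a - i0) % (j0 - i0)) (by omega) (by omega) (by rw [← hcb, ← hca]; exact h.symm)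
    have hmodeq : (a - i0) ≡ (b - i0) [MOD (j0 - i0)] := hwin
    have hdvd := (Nat.modEq_iff_dvd' (by omega)).mp hmodeq
    have : (b - i0) - (a - i0) = b - a := by omega
    rwa [this] at hdvd
  · rintro ⟨q, hq⟩
    have h1 : b = a + q * (j0 - i0) := by
      have := Nat.mul_comm (j0 - i0) q
      omega
    rw [h1, pvPer_mul n i0 j0 hij heq a q ha]

theorem pvP_char (n : Int) (i0 j0 : Nat) (hij : i0 < j0) (heq : pvSeq n i0 = pvSeq n j0)
    (hdist : ∀ a b : Nat, a < b → b < j0 → pvSeq n a ≠ pvSeq n b) (m : Nat) :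
    pvSeq n m = pvSeq n (2*m+1) ↔ (i0 ≤ m ∧ (j0 - i0) ∣ (m+1)) := by
  have hl : 0 < j0 - i0 := by omega
  constructor
  · intro h
    have him : i0 ≤ m := by
      rcases Nat.lt_or_ge m i0 with hmi | him
      swap
      · exact him
      exfalso
      rcases Nat.lt_or_ge (2*m+1) j0 with hcase | hcase
      · exact hdist m (2*m+1) (by omega) hcase h
      · have hi2 : i0 ≤ 2*m+1 := by omega
        have hc := pvCanon n i0 j0 hij heq (2*m+1) hi2
        have hw : i0 + (2*m+1 - i0) % (j0 - i0) < j0 := by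
          have := Nat.mod_lt (2*m+1 - i0) hl
          omega
        exact hdist m _ (by omega) hw (by rw [← hc]; exact h)
    refine ⟨him, ?_⟩
    have := (pvEq_iff_dvd n i0 j0 hij heq hdist m (2*m+1) him (by omega)).mp h
    have h2 : 2*m+1 - m = m + 1 := by omega
    rwa [h2] at this
  · rintro ⟨him, hdvd⟩
    apply (pvEq_iff_dvd n i0 j0 hij heq hdist m (2*m+1) him (by omega)).mpr
    have h2 : 2*m+1 - m = m + 1 := by omega
    rw [h2]; exact hdvd

theorem pvALoop1_eq (n : Int) (hn : 0 ≤ n) (K : Nat)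
    (hK : pvSeq n K = pvSeq n (2*K+1)) (hKmin : ∀ m : Nat, m < K → pvSeq n m ≠ pvSeq n (2*m+1)) :
    ∀ (fuel k : Nat), k ≤ K → K < k + fuel →
    pvALoop1 fuel (pvSeq n k) (pvSeq n (2*k+1)) = (pvSeq n K, pvSeq n (2*K+1)) := by
  intro fuel
  induction fuel with
  | zero => intro k h1 h2; omega
  | succ fuel ih =>
    intro k h1 h2
    show (if pvSeq n k = pvSeq n (2*k+1) then (pvSeq n k, pvSeq n (2*k+1))
          else pvALoop1 fuel (pvF (pvSeq n k)) (pvF (pvF (pvSeq n (2*k+1))))) = _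
    rcases Nat.eq_or_lt_of_le h1 with rfl | hlt
    · rw [if_pos hK]
    · rw [if_neg (hKmin k hlt)]
      rw [pvF_seq n hn k, pvF_seq n hn (2*k+1), pvF_seq n hn (2*k+1+1)]
      have h3 : 2*k+1+1+1 = 2*(k+1)+1 := by omega
      rw [h3]
      exact ih (k+1) (by omega) (by omega)

theorem pvALoop2_eq (n : Int) (hn : 0 ≤ n) (c : Nat) :
    ∀ (fuel m : Nat) (J : Nat) (ans : Int), m ≤ J → J < m + fuel → pvSeq n J = pvSeq n c →
    (∀ u : Nat, m ≤ u → u < J → pvSeq n u ≠ pvSeq n c) →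
    pvALoop2 fuel (pvSeq n c) (pvSeq n m) ans = ans + ((J - m : Nat) : Int) := by
  intro fuel
  induction fuel with
  | zero => intro m J ans h1 h2; omega
  | succ fuel ih =>
    intro m J ans h1 h2 hJ hmid
    show (if pvSeq n c = pvSeq n m then ans else pvALoop2 fuel (pvSeq n c) (pvF (pvSeq n m)) (ans + 1)) = _
    rcases Nat.eq_or_lt_of_le h1 with rfl | hlt
    · rw [if_pos hJ.symm]
      simp
    · rw [if_neg (fun hc => hmid m (le_refl m) hlt hc.symm)]
      rw [pvF_seq n hn m]
      rw [ih (m+1) J (ans+1) (by omega) (by omega) hJ (fun u hu1 hu2 => hmid u (by omega) hu2)]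
      have : ((J - m : Nat) : Int) = ((J - (m+1) : Nat) : Int) + 1 := by omega
      rw [this]; ring

theorem pvBLoop_eq (n : Int) (hn : 0 ≤ n) (hb : n ≤ 2 ^ 31) (i0 j0 : Nat) (hij : i0 < j0)
    (heq : pvSeq n i0 = pvSeq n j0)
    (hdist : ∀ a b : Nat, a < b → b < j0 → pvSeq n a ≠ pvSeq n b) :
    ∀ (fuel t : Nat) (d : PySem.Dict Int Int), t ≤ j0 → j0 < t + fuel →
    d.items = (List.range t).map (fun s => (pvSeq n s, (s : Int))) →
    pvBLoop fuel d (pvSeq n t) (t : Int) = (j0 : Int) - (i0 : Int) := by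
  intro fuel
  induction fuel with
  | zero => intro t d h1 h2; omega
  | succ fuel ih =>
    intro t d h1 h2 hitems
    have hkeys : d.keys = (List.range t).map (fun s => pvSeq n s) := by
      show d.items.map Prod.fst = _
      rw [hitems, List.map_map]
      rfl
    have hnodup : d.keys.Nodup := by
      rw [hkeys]
      refine List.Nodup.map_on ?_ (List.nodup_range)
      intro a ha b hb hab
      simp only [List.mem_range] at ha hb
      by_contra hne
      rcases Nat.lt_or_ge a b with h | h
      · exact hdist a b h (by omega) hab
      · exact hdist b a (by omega) (by omega) hab.symm
    show (match PySem.Dict.get? d (pvSeq n t) with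
          | some j => (t : Int) - j
          | none => pvBLoop fuel (PySem.Dict.insert d (pvSeq n t) t) (pvFb (pvSeq n t)) ((t : Int) + 1)) = _
    rcases Nat.eq_or_lt_of_le h1 with rfl | hlt
    · -- t = j0 : hit; the stored entry is (pvSeq n i0, i0)
      have hmem : (pvSeq n i0, (i0 : Int)) ∈ d.items := by
        rw [hitems]
        exact List.mem_map.mpr ⟨i0, List.mem_range.mpr hij, rfl⟩
      have hget : PySem.Dict.get? d (pvSeq n t) = some (i0 : Int) := by
        rw [← heq]
        exact PySem.Dict.get?_of_mem_items d hmem hnodup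
      rw [hget]
    · -- t < j0 : miss
      have hget : PySem.Dict.get? d (pvSeq n t) = none := by
        apply (PySem.Dict.get?_eq_none_iff_not_mem_keys d _).mpr
        rw [hkeys]
        intro hmem
        obtain ⟨s, hs, hs2⟩ := List.mem_map.mp hmem
        exact hdist s t (List.mem_range.mp hs) hlt hs2
      rw [hget, pvFb_seq n hn hb t]
      have hins : (PySem.Dict.insert d (pvSeq n t) (t : Int)).items
          = (List.range (t+1)).map (fun s => (pvSeq n s, (s : Int))) := by
        rw [PySem.Dict.items_insert_of_not_contains d _ (by rw [PySem.Dict.contains_eq_isSome_get?, hget]; rfl), hitems, List.range_succ]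
        simp
      have := ih (t+1) _ (by omega) (by omega) hins
      rw [show ((t:Int)+1) = ((t+1 : Nat) : Int) by push_cast; ring]
      exact this

-- ===== VERDICT (by name: the statement is the Claim_ definition above) =====
theorem repeat_sequence_len_spec : Claim_equal_repeat_sequence_len := by
  intro n hdom hpre
  unfold Spec_repeat_sequence_len
  have hn : 0 ≤ n := hpre
  have hb : n ≤ 2 ^ 31 := by
    unfold Dom_repeat_sequence_len pvDomInt at hdom
    simp only [decide_eq_true_eq] at hdom
    omega
  -- first repeat of the orbit
  obtain ⟨a, b, hab, hb812, habeq⟩ := pvExists_repeat n hn hb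
  haveI : DecidablePred (fun b => ∃ a, a < b ∧ pvSeq n a = pvSeq n b) := Classical.decPred _
  have hQ : ∃ b, ∃ a, a < b ∧ pvSeq n a = pvSeq n b := ⟨b, a, hab, habeq⟩
  obtain ⟨i0, hij, heq⟩ := Nat.find_spec hQ
  set j0 := Nat.find hQ with hj0def
  have hj0le : j0 ≤ 812 := le_trans (Nat.find_min' hQ ⟨a, hab, habeq⟩) hb812
  have hdist : ∀ a' b' : Nat, a' < b' → b' < j0 → pvSeq n a' ≠ pvSeq n b' := by
    intro a' b' h1 h2 hcon
    exact Nat.find_min hQ h2 ⟨a', h1, hcon⟩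
  set lam := j0 - i0 with hlamdef
  have hl : 0 < lam := by omega
  -- least meeting point of Floyd's loop
  have hqr := Nat.mod_add_div i0 lam
  have hrlt : i0 % lam < lam := Nat.mod_lt _ hl
  have hPm0 : pvSeq n (lam * (i0 / lam) + (lam - 1)) = pvSeq n (2*(lam * (i0 / lam) + (lam - 1))+1) := by
    apply (pvP_char n i0 j0 hij heq hdist _).mpr
    refine ⟨by omega, ⟨i0 / lam + 1, ?_⟩⟩
    have h5 : lam * (i0 / lam) + (lam - 1) + 1 = lam * (i0 / lam) + lam := by omega
    rw [hlamdef] at h5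
    rw [h5, Nat.mul_add, Nat.mul_one]
  haveI : DecidablePred (fun m => pvSeq n m = pvSeq n (2*m+1)) := fun _ => inferInstance
  have hPex : ∃ m, pvSeq n m = pvSeq n (2*m+1) := ⟨_, hPm0⟩
  set K := Nat.find hPex with hKdef
  have hPK : pvSeq n K = pvSeq n (2*K+1) := Nat.find_spec hPex
  have hKmin : ∀ m : Nat, m < K → pvSeq n m ≠ pvSeq n (2*m+1) := fun m hm => Nat.find_min hPex hm
  have hKle : K ≤ i0 + lam - 1 := le_trans (Nat.find_min' hPex hPm0) (by omega)
  obtain ⟨hKi0, hKdvd⟩ := (pvP_char n i0 j0 hij heq hdist K).mp hPK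
  -- A's value
  have hA : repeat_sequence_len n = (lam : Int) := by
    show pvALoop2 pvFuel (pvALoop1 pvFuel n (pvF n)).1 (pvF (pvALoop1 pvFuel n (pvF n)).2) 1 = (lam : Int)
    have e1 : pvF n = pvSeq n (2*0+1) := pvF_seq n hn 0
    have hL1 : pvALoop1 pvFuel n (pvF n) = (pvSeq n K, pvSeq n (2*K+1)) := by
      rw [e1]
      exact pvALoop1_eq n hn K hPK hKmin pvFuel 0 (Nat.zero_le _) (by unfold pvFuel; omega)
    rw [hL1]
    have e2 : pvF (pvSeq n (2*K+1)) = pvSeq n (2*K+2) := pvF_seq n hn (2*K+1)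
    simp only [e2]
    have hJeq : pvSeq n (2*K+1+lam) = pvSeq n K := by
      apply Eq.symm
      apply (pvEq_iff_dvd n i0 j0 hij heq hdist K (2*K+1+lam) hKi0 (by omega)).mpr
      have h3 : 2*K+1+lam - K = (K+1) + lam := by omega
      rw [hlamdef] at h3 ⊢
      rw [h3]
      exact dvd_add hKdvd (dvd_refl _)
    have hmid : ∀ u : Nat, 2*K+2 ≤ u → u < 2*K+1+lam → pvSeq n u ≠ pvSeq n K := by
      intro u h1 h2 hc
      have hdu := (pvEq_iff_dvd n i0 j0 hij heq hdist K u hKi0 (by omega)).mp hc.symm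
      have := Nat.le_of_dvd (by omega) (Nat.dvd_sub hdu hKdvd)
      omega
    have hL2 := pvALoop2_eq n hn K pvFuel (2*K+2) (2*K+1+lam) 1 (by omega)
      (by unfold pvFuel; omega) hJeq hmid
    rw [hL2]
    have h4 : 2*K+1+lam - (2*K+2) = lam - 1 := by omega
    rw [h4]
    omega
  -- B's value
  have hB : repeat_sequence_len_alt n = (j0 : Int) - (i0 : Int) := by
    show pvBLoop pvFuel PySem.Dict.empty n 0 = (j0 : Int) - (i0 : Int)
    have := pvBLoop_eq n hn hb i0 j0 hij heq hdist pvFuel 0 PySem.Dict.empty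
      (Nat.zero_le _) (by unfold pvFuel; omega) (by rfl)
    simpa using this
  rw [hA, hB]
  omega
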